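-- pv_equiv track=rewrite | github.com/mariatics/repositorio3 | carpeta/clases.py | frec_abs
-- ===== SOURCE A (Python) =====
-- def frec_abs(datos_entrada):
--     datos_entrada.sort()
--     clases, fa_absoluta = [], []
--     for elemento in datos_entrada:
--         if elemento not in clases:
--             clases.append(elemento)
--             fa_absoluta.append(1)
--         else:
--             idx = clases.index(elemento)
--             fa_absoluta[idx] += 1
--     return clases, fa_absoluta
-- ===== SOURCE B (Python) =====
-- def frec_abs(datos_entrada):
--     # Same in-place sort side effect as the original.
--     datos_entrada.sort()
--     clases, fa_absoluta = [], []
--     i, n = 0, len(datos_entrada)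
--     while i < n:
--         # two-pointer run scan: j runs to the end of the block of equal values
--         j = i
--         while j < n and datos_entrada[j] == datos_entrada[i]:
--             j += 1
--         clases.append(datos_entrada[i])
--         fa_absoluta.append(j - i)
--         i = j
--     return clases, fa_absoluta
-- ===== Notes on version B (the rewrite author's own statement) =====
-- stated objective: faster
-- what changed: replaces the per-element membership test and list.index rescans with a single two-pointer pass over the sorted data that emits each run of equal values and its length
import Mathlib
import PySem

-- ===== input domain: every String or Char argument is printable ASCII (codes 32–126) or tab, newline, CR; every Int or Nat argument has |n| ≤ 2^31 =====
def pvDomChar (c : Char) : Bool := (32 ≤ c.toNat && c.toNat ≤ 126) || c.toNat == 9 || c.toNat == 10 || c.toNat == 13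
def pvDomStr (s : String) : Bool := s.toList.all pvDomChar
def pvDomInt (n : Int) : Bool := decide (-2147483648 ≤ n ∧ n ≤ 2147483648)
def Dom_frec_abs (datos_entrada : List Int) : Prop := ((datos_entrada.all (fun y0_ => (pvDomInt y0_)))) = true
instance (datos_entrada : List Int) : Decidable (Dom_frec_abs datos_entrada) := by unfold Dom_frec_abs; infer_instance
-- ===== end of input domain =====

-- B replaces A's per-element membership test and list.index rescans by one two-pointer
-- pass over the sorted data emitting each run and its length (faster).
-- Both Pythons sort the argument IN PLACE; the equivalence proved here is about the return value.

-- ===== PORT A =====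
-- one loop step: 'if elemento not in clases: append both else: fa_absoluta[clases.index(elemento)] += 1'
def frecStepA (st : List Int × List Int) (e : Int) : List Int × List Int :=
  if st.1.contains e then
    match PySem.List.index? st.1 e with
    | some idx => (st.1, st.2.set idx (st.2.getD idx 0 + 1))
    | none => (st.1, st.2)   -- unreachable: e ∈ clases
  else (st.1 ++ [e], st.2 ++ [1])

def frec_abs (datos_entrada : List Int) : List Int × List Int :=
  (PySem.List.sorted datos_entrada (fun x => x) false).foldl frecStepA ([], [])

-- ===== PORT B =====
-- inner while loop 'j += 1 while datos_entrada[j] == datos_entrada[i]': length of the run of x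
def runLen (x : Int) : List Int → Nat
  | [] => 0
  | y :: t => if y = x then runLen x t + 1 else 0

-- 'i = j': the data after the run of x
def runDrop (x : Int) : List Int → List Int
  | [] => []
  | y :: t => if y = x then runDrop x t else y :: t

theorem runDrop_length_le (x : Int) : ∀ l : List Int, (runDrop x l).length ≤ l.length
  | [] => Nat.le_refl _
  | y :: t => by
      simp only [runDrop]
      split
      · exact Nat.le_succ_of_le (runDrop_length_le x t)
      · exact Nat.le_refl _

-- outer while loop: emit the run's first value and its length, continue after the run
def frecRuns : List Int → List Int × List Int
  | [] => ([], [])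
  | x :: rest =>
    let p := frecRuns (runDrop x rest)
    (x :: p.1, ((runLen x rest : Int) + 1) :: p.2)
  termination_by l => l.length
  decreasing_by simpa using Nat.lt_succ_of_le (runDrop_length_le x rest)

def frec_abs_alt (datos_entrada : List Int) : List Int × List Int :=
  frecRuns (PySem.List.sorted datos_entrada (fun x => x) false)

-- ===== PRECONDITION & SPEC =====
def Spec_frec_abs (datos_entrada : List Int) (out : List Int × List Int) : Prop := out = frec_abs_alt datos_entrada
instance (datos_entrada : List Int) (out : List Int × List Int) : Decidable (Spec_frec_abs datos_entrada out) := by unfold Spec_frec_abs; infer_instance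

-- ===== CLAIM (what is proved, stated in full; the proofs are below) =====
def Claim_equal_frec_abs : Prop := ∀ (datos_entrada : List Int), Dom_frec_abs datos_entrada → Spec_frec_abs datos_entrada (frec_abs datos_entrada)

-- ===== LEMMAS AND PROOFS =====

theorem frecRuns_nil : frecRuns [] = ([], []) := by rw [frecRuns]

theorem frecRuns_cons (x : Int) (rest : List Int) :
    frecRuns (x :: rest) =
      (x :: (frecRuns (runDrop x rest)).1,
       ((runLen x rest : Int) + 1) :: (frecRuns (runDrop x rest)).2) := by
  rw [frecRuns]

-- A's fold, started just after appending a class x that is strictly above every earlier class,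
-- on sorted remaining data all ≥ x, produces the runs of the remaining data (merging x's run into k).
theorem foldA_run (s : List Int) : ∀ (cs fs : List Int) (x : Int) (k : Int),
    s.Pairwise (· ≤ ·) → (∀ c ∈ cs, c < x) → (∀ a ∈ s, x ≤ a) → fs.length = cs.length →
    s.foldl frecStepA (cs ++ [x], fs ++ [k]) =
      (cs ++ [x] ++ (frecRuns (runDrop x s)).1,
       fs ++ [k + (runLen x s : Int)] ++ (frecRuns (runDrop x s)).2) := by
  induction s with
  | nil =>
    intro cs fs x k _ _ _ _
    simp [runDrop, runLen, frecRuns_nil]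
  | cons a s ih =>
    intro cs fs x k hsort hlt hge hlen
    have hxa : x ≤ a := hge a (List.mem_cons_self ..)
    have hsort' : s.Pairwise (· ≤ ·) := hsort.of_cons
    have ha_le : ∀ b ∈ s, a ≤ b := fun b hb => (List.pairwise_cons.mp hsort).1 b hb
    by_cases hax : a = x
    · -- same run: A increments the last count
      subst hax
      have hstep : frecStepA (cs ++ [a], fs ++ [k]) a = (cs ++ [a], fs ++ [k + 1]) := by
        have hnm : a ∉ cs := fun h => absurd (hlt a h) (lt_irrefl a)
        have hidx : PySem.List.index? (cs ++ [a]) a = some cs.length :=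
          PySem.List.index?_append_singleton_self cs a hnm
        simp only [frecStepA, hidx]
        have hcont : (cs ++ [a]).contains a = true := by simp
        rw [if_pos hcont]
        have hset : (fs ++ [k]).set cs.length ((fs ++ [k]).getD cs.length 0 + 1)
            = fs ++ [k + 1] := by
          rw [← hlen]
          rw [List.getD_eq_getElem?_getD]
          simp [List.set_append_right]
        rw [hset]
      rw [List.foldl_cons, hstep,
        ih cs fs a (k + 1) hsort' hlt ha_le hlen]
      simp only [runDrop, runLen, ite_true]
      push_cast
      ring_nf
    · -- new run: a > x, A appends a new class
      have hxa' : x < a := lt_of_le_of_ne hxa (fun h => hax h.symm)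
      have hstep : frecStepA (cs ++ [x], fs ++ [k]) a = ((cs ++ [x]) ++ [a], (fs ++ [k]) ++ [1]) := by
        have hnm : a ∉ cs ++ [x] := by
          intro h
          rcases List.mem_append.mp h with h | h
          · exact absurd (lt_trans (hlt a h) hxa') (lt_irrefl a)
          · exact hax (List.mem_singleton.mp h)
        simp only [frecStepA]
        rw [if_neg (by simpa using hnm)]
      rw [List.foldl_cons, hstep,
        ih (cs ++ [x]) (fs ++ [k]) a 1
          hsort'
          (fun c hc => by
            rcases List.mem_append.mp hc with h | h
            · exact lt_trans (hlt c h) hxa'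
            · exact (List.mem_singleton.mp h) ▸ hxa')
          ha_le
          (by simp [hlen])]
      simp only [runDrop, runLen, if_neg hax, frecRuns_cons]
      simp only [List.append_assoc, List.cons_append, List.nil_append]
      push_cast
      ring_nf

theorem foldA_eq_runs (s : List Int) (hs : s.Pairwise (· ≤ ·)) :
    s.foldl frecStepA ([], []) = frecRuns s := by
  cases s with
  | nil => simp [frecRuns_nil]
  | cons x t =>
    have hge : ∀ a ∈ t, x ≤ a := fun a ha => (List.pairwise_cons.mp hs).1 a ha
    have hstep : frecStepA ([], []) x = ([] ++ [x], [] ++ [(1 : Int)]) := by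
      simp [frecStepA]
    rw [List.foldl_cons, hstep,
      foldA_run t [] [] x 1 hs.of_cons (by simp) hge rfl,
      frecRuns_cons]
    simp only [List.nil_append, List.singleton_append]
    ring_nf

-- ===== VERDICT (by name: the statement is the Claim_ definition above) =====
theorem frec_abs_spec : Claim_equal_frec_abs := by
  intro datos _
  unfold Spec_frec_abs frec_abs frec_abs_alt
  exact foldA_eq_runs _ (PySem.List.sorted_pairwise datos (fun x => x))
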